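-- pv_equiv track=rewrite | github.com/shua-ie/QuarryCore | src/quarrycore/extractor/content_processors.py | _clean_code_text
-- ===== SOURCE A (Python) =====
-- from typing import Any, Dict, List, Optional, Tuple
--
-- def _clean_code_text(text: str) -> str:
--     """Clean and format code text."""
--     if not text:
--         return ""
--
--     # Remove excessive whitespace while preserving structure
--     lines = text.split("\n")
--     cleaned_lines: List[str] = []
--
--     for line in lines:
--         # Keep indentation but clean up extra spaces
--         stripped = line.rstrip()
--         if stripped or (cleaned_lines and cleaned_lines[-1]):  # Keep empty lines between content
--             cleaned_lines.append(stripped)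
--
--     # Remove trailing empty lines
--     while cleaned_lines and not cleaned_lines[-1]:
--         cleaned_lines.pop()
--
--     result = "\n".join(cleaned_lines)
--     return str(result) if result else ""
-- ===== SOURCE B (Python) =====
-- def _clean_code_text(text: str) -> str:
--     """Clean and format code text: paragraph decomposition instead of a
--     conditional-append loop with trailing-blank popping."""
--     paragraphs = []
--     current = []
--     for raw in text.split("\n"):
--         line = raw.rstrip()
--         if line:
--             current.append(line)
--         elif current:
--             paragraphs.append(current)
--             current = []
--     if current:
--         paragraphs.append(current)
--     return "\n\n".join("\n".join(p) for p in paragraphs)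
-- ===== Notes on version B (the rewrite author's own statement) =====
-- stated objective: simpler
-- what changed: A appends lines one-by-one under a look-at-last-element condition and then pops trailing blanks in a second while-loop; B decomposes the text into paragraphs (maximal runs of nonblank rstripped lines) and joins them with a blank line, which makes the leading/trailing/duplicate blank handling fall out of the grouping instead of being special-cased.
import Mathlib
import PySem

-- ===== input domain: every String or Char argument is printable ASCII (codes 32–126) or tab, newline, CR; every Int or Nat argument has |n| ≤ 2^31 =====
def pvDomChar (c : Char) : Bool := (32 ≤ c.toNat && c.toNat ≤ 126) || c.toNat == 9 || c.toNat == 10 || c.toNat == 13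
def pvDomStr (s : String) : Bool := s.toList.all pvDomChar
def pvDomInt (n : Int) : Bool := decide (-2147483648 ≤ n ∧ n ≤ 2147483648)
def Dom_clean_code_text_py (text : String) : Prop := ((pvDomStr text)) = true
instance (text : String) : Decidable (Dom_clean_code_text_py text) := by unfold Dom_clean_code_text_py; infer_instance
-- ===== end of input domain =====

-- B replaces A's conditional-append loop with trailing-blank popping by a paragraph
-- decomposition (group nonblank lines, join paragraphs with a blank line): simpler.


-- ===== PORT A =====
-- loop body of A's 'for line in lines'
def pvStepA (acc : List String) (line : String) : List String :=
  let stripped := PySem.Str.rstrip line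
  if stripped ≠ "" ∨ (acc ≠ [] ∧ acc.getLast? ≠ some "") then acc ++ [stripped] else acc

-- 'while cleaned_lines and not cleaned_lines[-1]: cleaned_lines.pop()'
def pvPopTrailing (xs : List String) : List String :=
  if xs.getLast? = some "" then pvPopTrailing xs.dropLast else xs
termination_by xs.length
decreasing_by cases xs <;> simp_all

def clean_code_text_py (text : String) : String :=
  if text = "" then ""
  else
    let lines := (PySem.Str.split? text "\n").getD []   -- sep "\n" ≠ "", so split? is `some`
    let cleaned := lines.foldl pvStepA ([] : List String)
    let cleaned := pvPopTrailing cleaned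
    let result := PySem.Str.join "\n" cleaned
    if result ≠ "" then result else ""

-- ===== PORT B =====
-- loop body of B's 'for raw in text.split("\n")'
def pvStepB (st : List (List String) × List String) (raw : String) : List (List String) × List String :=
  let line := PySem.Str.rstrip raw
  if line ≠ "" then (st.1, st.2 ++ [line])
  else if st.2 ≠ [] then (st.1 ++ [st.2], ([] : List String))
  else st

def clean_code_text_py_alt (text : String) : String :=
  let st := ((PySem.Str.split? text "\n").getD []).foldl pvStepB
    (([], []) : List (List String) × List String)
  let paragraphs := if st.2 ≠ [] then st.1 ++ [st.2] else st.1
  PySem.Str.join "\n\n" (paragraphs.map (PySem.Str.join "\n"))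

-- ===== PRECONDITION & SPEC =====
def Spec_clean_code_text_py (text : String) (out : String) : Prop := out = clean_code_text_py_alt text
instance (text : String) (out : String) : Decidable (Spec_clean_code_text_py text out) := by unfold Spec_clean_code_text_py; infer_instance

-- ===== CLAIM (what is proved, stated in full; the proofs are below) =====
def Claim_equal_clean_code_text_py : Prop := ∀ (text : String), Dom_clean_code_text_py text → Spec_clean_code_text_py text (clean_code_text_py text)

-- ===== LEMMAS AND PROOFS =====

-- A's accumulator, expressed from B's state (paragraphs so far, current paragraph)
def pvAccOf (p : List (List String)) (c : List String) : List String :=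
  if c ≠ [] then List.intercalate [""] (p ++ [c])
  else if p ≠ [] then List.intercalate [""] p ++ [""] else []

def pvGood (p : List (List String)) : Prop := ∀ g ∈ p, g ≠ [] ∧ ∀ x ∈ g, x ≠ ""

lemma inter_cons2 {α : Type} (sep : List α) (a b : List α) (l : List (List α)) :
    List.intercalate sep (a :: b :: l) = a ++ sep ++ List.intercalate sep (b :: l) := by
  simp [List.intercalate]

lemma inter_snoc {α : Type} (sep : List α) (gs : List (List α)) (g : List α) :
    List.intercalate sep (gs ++ [g]) =
      (if gs = [] then ([] : List α) else List.intercalate sep gs ++ sep) ++ g := by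
  induction gs with
  | nil => simp [List.intercalate]
  | cons a gs ih =>
    cases gs with
    | nil => simp [List.intercalate]
    | cons b gs' =>
      simp only [List.cons_append]
      rw [inter_cons2, ← List.cons_append, ih, inter_cons2]
      simp [List.append_assoc]

lemma getLast?_accOf_ne (p : List (List String)) (c : List String)
    (hc : c ≠ []) (hce : ∀ x ∈ c, x ≠ "") :
    (List.intercalate [""] (p ++ [c])).getLast? ≠ some "" := by
  rw [inter_snoc, List.getLast?_append]
  have : c.getLast? = some (c.getLast hc) := List.getLast?_eq_getLast hc
  rw [this, Option.some_or]
  intro h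
  exact hce _ (List.getLast_mem hc) (by injection h)

lemma accOf_ne_nil (p : List (List String)) (c : List String) (hc : c ≠ []) :
    pvAccOf p c ≠ [] := by
  simp only [pvAccOf, if_pos hc]
  rw [inter_snoc]
  simp [hc]

-- one loop step in lock-step
lemma getLast?_inter_ne (p : List (List String)) (hp : pvGood p) (hpn : p ≠ []) :
    (List.intercalate [""] p).getLast? ≠ some "" := by
  obtain ⟨gs, g, rfl⟩ := (List.eq_nil_or_concat p).resolve_left hpn
  have hg := hp g (by simp)
  rw [List.concat_eq_append, inter_snoc, List.getLast?_append]
  have : g.getLast? = some (g.getLast hg.1) := List.getLast?_eq_getLast hg.1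
  rw [this, Option.some_or]
  intro h
  exact hg.2 _ (List.getLast_mem hg.1) (by injection h)

lemma step_lock (p : List (List String)) (c : List String)
    (_hp : pvGood p) (hc : ∀ x ∈ c, x ≠ "") (l : String) :
    pvStepA (pvAccOf p c) l = pvAccOf (pvStepB (p, c) l).1 (pvStepB (p, c) l).2 := by
  by_cases hs : PySem.Str.rstrip l = ""
  · by_cases hcn : c = []
    · by_cases hpn : p = []
      · simp [pvStepA, pvStepB, pvAccOf, hs, hcn, hpn]
      · -- blank line while already after a flushed paragraph: both sides unchanged
        have hlast : (List.intercalate [""] p ++ [""]).getLast? = some "" := by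
          rw [List.getLast?_append]
          rfl
        simp [pvStepA, pvStepB, pvAccOf, hs, hcn, hpn, hlast]
    · -- blank line after content: A appends "", B flushes the paragraph
      have hne := accOf_ne_nil p c hcn
      have hlast : (pvAccOf p c).getLast? ≠ some "" := by
        simpa [pvAccOf, if_pos hcn] using getLast?_accOf_ne p c hcn hc
      simp only [pvStepA, pvStepB, hs]
      rw [if_pos (Or.inr ⟨hne, hlast⟩), if_neg (by simp), if_pos (by simpa using hcn)]
      simp [pvAccOf, hcn]
  · by_cases hcn : c = []
    · by_cases hpn : p = []
      · simp [pvStepA, pvStepB, pvAccOf, hs, hcn, hpn, List.intercalate]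
      · -- first line of a new paragraph after a flushed one
        have h1 : List.intercalate [""] (p ++ [[PySem.Str.rstrip l]])
            = (List.intercalate [""] p ++ [""]) ++ [PySem.Str.rstrip l] := by
          rw [inter_snoc]
          simp [hpn]
        simp [pvStepA, pvStepB, pvAccOf, hs, hcn, hpn, h1]
    · -- another line of the current paragraph
      have hcs : c ++ [PySem.Str.rstrip l] ≠ [] := by simp
      simp [pvStepA, pvStepB, pvAccOf, hs, hcn, hcs, inter_snoc, List.append_assoc]

lemma invariant (ls : List String) (p : List (List String)) (c : List String)
    (hp : pvGood p) (hc : ∀ x ∈ c, x ≠ "") :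
    pvGood (ls.foldl pvStepB (p, c)).1 ∧ (∀ x ∈ (ls.foldl pvStepB (p, c)).2, x ≠ "") ∧
      ls.foldl pvStepA (pvAccOf p c) = pvAccOf (ls.foldl pvStepB (p, c)).1 (ls.foldl pvStepB (p, c)).2 := by
  induction ls generalizing p c with
  | nil => exact ⟨hp, hc, rfl⟩
  | cons l ls ih =>
    have hstep := step_lock p c hp hc l
    have hp' : pvGood (pvStepB (p, c) l).1 := by
      simp only [pvStepB]
      split_ifs with h1 h2
      · exact hp
      · intro g hg
        rcases List.mem_append.1 hg with h | h
        · exact hp g h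
        · simp at h; subst h; exact ⟨h2, hc⟩
      · exact hp
    have hc' : ∀ x ∈ (pvStepB (p, c) l).2, x ≠ "" := by
      simp only [pvStepB]
      split_ifs with h1 h2
      · intro x hx
        rcases List.mem_append.1 hx with h | h
        · exact hc x h
        · simp at h; subst h; exact h1
      · simp
      · exact hc
    have := ih (pvStepB (p, c) l).1 (pvStepB (p, c) l).2 hp' hc'
    simpa [List.foldl_cons, hstep] using this

lemma pop_accOf (p : List (List String)) (c : List String)
    (hp : pvGood p) (hc : ∀ x ∈ c, x ≠ "") :
    pvPopTrailing (pvAccOf p c) = List.intercalate [""] (if c ≠ [] then p ++ [c] else p) := by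
  by_cases hcn : c = []
  · subst hcn
    by_cases hpn : p = []
    · simp [pvAccOf, pvPopTrailing, hpn, List.intercalate]
    · have h1 : (List.intercalate [""] p ++ [""]).getLast? = some "" := by
        rw [List.getLast?_append]
        rfl
      rw [show pvAccOf p [] = List.intercalate [""] p ++ [""] from by simp [pvAccOf, hpn]]
      rw [pvPopTrailing, if_pos h1, List.dropLast_concat, pvPopTrailing,
        if_neg (getLast?_inter_ne p hp hpn)]
      simp
  · rw [if_pos hcn]
    simp only [pvAccOf, if_pos hcn]
    rw [pvPopTrailing, if_neg (getLast?_accOf_ne p c hcn hc)]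

lemma map_intersperse' {α β : Type} (f : α → β) (sep : α) (l : List α) :
    (List.intersperse sep l).map f = List.intersperse (f sep) (l.map f) := by
  induction l with
  | nil => simp
  | cons a l ih =>
    cases l with
    | nil => simp [List.intersperse]
    | cons b l' =>
      have h1 : List.intersperse sep (a::b::l') = a :: sep :: List.intersperse sep (b::l') := by
        simp [List.intersperse]
      have h2 : List.intersperse (f sep) (f a :: f b :: l'.map f)
          = f a :: f sep :: List.intersperse (f sep) (f b :: l'.map f) := by
        simp [List.intersperse]
      simp only [h1, List.map_cons, ih, h2]

lemma map_intercalate {α β : Type} (f : α → β) (sep : List α) (gs : List (List α)) :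
    (List.intercalate sep gs).map f = List.intercalate (sep.map f) (gs.map (List.map f)) := by
  simp only [List.intercalate, List.map_flatten]
  rw [map_intersperse']

lemma inter_ne_nil (g : List (List Char)) (r : List (List (List Char))) (hg : g ≠ []) :
    List.intercalate [[]] (g :: r) ≠ [] := by
  cases r with
  | nil => simpa [List.intercalate] using hg
  | cons b r' => rw [inter_cons2]; simp [hg]

lemma chars_join_append (sep : List Char) (xs ys : List (List Char))
    (hx : xs ≠ []) (hy : ys ≠ []) :
    PySem.Chars.join sep (xs ++ ys) = PySem.Chars.join sep xs ++ sep ++ PySem.Chars.join sep ys := by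
  induction xs with
  | nil => exact absurd rfl hx
  | cons a xs ih =>
    cases xs with
    | nil =>
      cases ys with
      | nil => exact absurd rfl hy
      | cons y ys' => simp [PySem.Chars.join_cons_cons, PySem.Chars.join_singleton]
    | cons b xs' =>
      rw [List.cons_append, List.cons_append, PySem.Chars.join_cons_cons]
      rw [← List.cons_append, ih (List.cons_ne_nil _ _), PySem.Chars.join_cons_cons]
      simp

lemma chars_collapse (GS : List (List (List Char))) (h : ∀ g ∈ GS, g ≠ []) :
    PySem.Chars.join ['\n'] (List.intercalate [[]] GS)
      = PySem.Chars.join ['\n', '\n'] (GS.map (PySem.Chars.join ['\n'])) := by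
  induction GS with
  | nil => simp [List.intercalate, PySem.Chars.join_nil]
  | cons g r ih =>
    cases r with
    | nil => simp [List.intercalate, PySem.Chars.join_singleton]
    | cons g' r' =>
      have hg : g ≠ [] := h g (by simp)
      have hg' : g' ≠ [] := h g' (by simp)
      have hrest : ∀ x ∈ g' :: r', x ≠ [] := fun x hx => h x (by simp [hx])
      rw [inter_cons2, List.append_assoc]
      rw [chars_join_append _ _ _ hg (by simp)]
      rw [chars_join_append _ _ _ (by simp) (inter_ne_nil g' r' hg')]
      rw [PySem.Chars.join_singleton, ih hrest]
      simp [PySem.Chars.join_cons_cons, List.append_assoc]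

lemma join_collapse (gs : List (List String)) (h : ∀ g ∈ gs, g ≠ []) :
    PySem.Str.join "\n" (List.intercalate [""] gs)
      = PySem.Str.join "\n\n" (gs.map (PySem.Str.join "\n")) := by
  apply String.toList_injective
  rw [PySem.Str.toList_join, PySem.Str.toList_join, map_intercalate]
  have h1 : (List.map String.toList [""]) = [([] : List Char)] := by decide
  have h2 : String.toList "\n" = ['\n'] := by decide
  have h3 : String.toList "\n\n" = ['\n', '\n'] := by decide
  rw [h1, h2, h3]
  have h4 : List.map String.toList (gs.map (PySem.Str.join "\n"))
      = (gs.map (List.map String.toList)).map (PySem.Chars.join ['\n']) := by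
    simp [PySem.Str.toList_join, h2, Function.comp]
  rw [h4]
  exact chars_collapse _ (by
    intro g hg
    rcases List.mem_map.1 hg with ⟨g0, hg0, rfl⟩
    simpa using h g0 hg0)

lemma if_ne_id (r : String) : (if r ≠ "" then r else "") = r := by
  by_cases h : r = "" <;> simp [h]

-- ===== VERDICT (by name: the statement is the Claim_ definition above) =====
theorem clean_code_text_py_spec : Claim_equal_clean_code_text_py := by
  intro text _
  unfold Spec_clean_code_text_py clean_code_text_py clean_code_text_py_alt
  by_cases htext : text = ""
  · subst htext; decide
  · rw [if_neg htext]
    simp only [if_ne_id]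
    have hinv := invariant ((PySem.Str.split? text "\n").getD []) [] []
      (by intro g hg; cases hg) (by intro x hx; cases hx)
    obtain ⟨hp, hc, heq⟩ := hinv
    have hacc0 : pvAccOf ([] : List (List String)) ([] : List String) = [] := by simp [pvAccOf]
    rw [hacc0] at heq
    rw [heq, pop_accOf _ _ hp hc, join_collapse]
    intro g hg
    split_ifs at hg with h
    · rcases List.mem_append.1 hg with h1 | h1
      · exact (hp g h1).1
      · simp at h1; subst h1; exact h
    · exact (hp g hg).1
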